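-- pv_equiv track=rewrite | github.com/chickenmilkcream/Interview | Python-Developer/question_3.py | minimum_points
-- ===== SOURCE A (Python) =====
-- def minimum_points(threshold, points):
--     """
--     Space: O(1)
--     Time: O(n)
--     """
--     n = len(points)
--     if n <= 0:
--         return 0
--     if points[-1] - points[0] < threshold:
--         return n
--
--     i = 0
--     questions = 1
--     start = points[0]
--     while i < n and points[i]-start < threshold:
--         i += 2
--         questions += 1
--
--     return questions
-- ===== SOURCE B (Python) =====
-- def minimum_points(threshold, points):
--     n = len(points)
--     if n <= 0:
--         return 0
--     start = points[0]
--     if points[-1] - start < threshold: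
--         return n
--     # stride-2 sublist, then its running maximum: the predicate
--     # pm[j] - start >= threshold is monotone in j, so binary search applies
--     evens = points[::2]
--     pm = []
--     m = evens[0]
--     for v in evens:
--         if v > m:
--             m = v
--         pm.append(m)
--     lo, hi = 0, len(pm)
--     while lo < hi:
--         mid = (lo + hi) // 2
--         if pm[mid] - start >= threshold:
--             hi = mid
--         else:
--             lo = mid + 1
--     return 1 + lo
-- ===== Notes on version B (the rewrite author's own statement) =====
-- stated objective: alternative
-- what changed: B takes the stride-2 sublist, builds its running-maximum array so the 'span reached threshold' predicate becomes monotone, and locates the first qualifying position by binary search, instead of A's stride-2 while loop with a running counter.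
import Mathlib
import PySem

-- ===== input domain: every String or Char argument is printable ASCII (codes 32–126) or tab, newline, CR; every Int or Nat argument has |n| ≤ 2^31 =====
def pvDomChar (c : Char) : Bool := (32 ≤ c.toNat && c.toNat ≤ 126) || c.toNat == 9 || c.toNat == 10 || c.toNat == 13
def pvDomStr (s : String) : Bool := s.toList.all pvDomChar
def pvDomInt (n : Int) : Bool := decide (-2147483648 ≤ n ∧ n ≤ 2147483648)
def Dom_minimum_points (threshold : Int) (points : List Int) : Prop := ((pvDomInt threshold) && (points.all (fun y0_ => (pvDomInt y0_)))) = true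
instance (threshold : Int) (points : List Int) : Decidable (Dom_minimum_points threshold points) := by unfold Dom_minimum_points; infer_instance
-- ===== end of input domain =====

-- B replaces A's stride-2 while loop and running counter by taking the stride-2
-- sublist, building its running-maximum array (making the span predicate monotone)
-- and binary-searching the first qualifying position (objective: alternative).


-- ===== PORT A =====
-- A's while loop: i starts at 0, steps by 2, questions counts iterations starting at 1.
-- points[i] is always in range under the guard i < n (and 0 ≤ i), so `.getD 0` is exact.
def minimum_points_loop (threshold start : Int) (points : List Int) (n i questions : Int) : Int :=
  if _h : i < n then
    if (PySem.List.pyGet? points i).getD 0 - start < threshold then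
      minimum_points_loop threshold start points n (i + 2) (questions + 1)
    else questions
  else questions
termination_by (n - i).toNat
decreasing_by omega

def minimum_points (threshold : Int) (points : List Int) : Int :=
  let n : Int := points.length
  if n ≤ 0 then 0
  else if (PySem.List.pyGet? points (-1)).getD 0 - (PySem.List.pyGet? points 0).getD 0 < threshold then n
  else minimum_points_loop threshold ((PySem.List.pyGet? points 0).getD 0) points n 0 1

-- ===== PORT B =====
-- points[::2] ported by hand (PySem.List.slice has no step argument); exact for
-- a nonnegative step-2 full slice: take the head, skip one, recurse.
def pvStride2 : List Int → List Int
  | [] => []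
  | v :: rest => v :: pvStride2 (rest.drop 1)
termination_by l => l.length
decreasing_by simp

-- the `for v in evens` loop building pm: `if v > m: m = v; pm.append(m)`
def pvBuildPM (m : Int) : List Int → List Int
  | [] => []
  | v :: rest => (if m < v then v else m) :: pvBuildPM (if m < v then v else m) rest

-- `(lo + hi) // 2` is Python floor division; needed (by name) in decreasing_by
theorem pvFd (a : Int) : PySem.Int.floordiv a 2 = a / 2 := by
  unfold PySem.Int.floordiv; rw [Int.fdiv_eq_ediv]; simp

-- the `while lo < hi` binary-search loop; pm[mid] in range under the invariant
def pvBSearch (threshold start : Int) (pm : List Int) (lo hi : Int) : Int :=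
  if lo < hi then
    let mid := PySem.Int.floordiv (lo + hi) 2
    if threshold ≤ (PySem.List.pyGet? pm mid).getD 0 - start then
      pvBSearch threshold start pm lo mid
    else
      pvBSearch threshold start pm (mid + 1) hi
  else lo
termination_by (hi - lo).toNat
decreasing_by
  · have := pvFd (lo + hi); simp only [mid, this] at *; omega
  · have := pvFd (lo + hi); simp only [mid, this] at *; omega

def minimum_points_alt (threshold : Int) (points : List Int) : Int :=
  let n : Int := points.length
  if n ≤ 0 then 0
  else
    let start := (PySem.List.pyGet? points 0).getD 0
    if (PySem.List.pyGet? points (-1)).getD 0 - start < threshold then n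
    else
      let evens := pvStride2 points
      let pm := pvBuildPM ((PySem.List.pyGet? evens 0).getD 0) evens
      1 + pvBSearch threshold start pm 0 pm.length

-- ===== PRECONDITION & SPEC =====
def Spec_minimum_points (threshold : Int) (points : List Int) (out : Int) : Prop := out = minimum_points_alt threshold points
instance (threshold : Int) (points : List Int) (out : Int) : Decidable (Spec_minimum_points threshold points out) := by unfold Spec_minimum_points; infer_instance

-- ===== CLAIM (what is proved, stated in full; the proofs are below) =====
def Claim_equal_minimum_points : Prop := ∀ (threshold : Int) (points : List Int), Dom_minimum_points threshold points → Spec_minimum_points threshold points (minimum_points threshold points)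

-- ===== LEMMAS AND PROOFS =====

-- reference count: number of stride-2 steps A performs on a suffix
def pvCnt (threshold start : Int) : List Int → Int
  | [] => 0
  | v :: rest => if v - start < threshold then 1 + pvCnt threshold start (rest.drop 1) else 0
termination_by l => l.length
decreasing_by simp

-- leading-prefix count on a flat list (the common value both ports compute)
def pvCW (threshold start : Int) : List Int → Int
  | [] => 0
  | v :: rest => if v - start < threshold then 1 + pvCW threshold start rest else 0

theorem loop_eq_cnt (threshold start : Int) (points : List Int) :
    ∀ (i q : Int), 0 ≤ i →
      minimum_points_loop threshold start points points.length i q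
        = q + pvCnt threshold start (points.drop i.toNat) := by
  intro i q hi
  induction h : (points.length - i.toNat) using Nat.strong_induction_on generalizing i q with
  | _ m ih =>
    by_cases hlt : i < (points.length : Int)
    · have hlen : i.toNat < points.length := by omega
      obtain ⟨v, rest, hvr⟩ : ∃ v rest, points.drop i.toNat = v :: rest := by
        cases hd : points.drop i.toNat with
        | nil => exfalso; have := List.drop_eq_nil_iff.mp hd; omega
        | cons a b => exact ⟨a, b, rfl⟩
      have hget : PySem.List.pyGet? points i = some v := by
        have : points[i.toNat]? = some v := by
          rw [List.getElem?_eq_getElem (by omega)]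
          have := List.getElem_drop (xs := points) (i := i.toNat) (j := 0) (h := by simp [hvr])
          simpa [hvr] using this.symm
        have hcast : (i.toNat : Int) = i := by omega
        rw [← hcast, PySem.List.pyGet?_natCast, this]
      rw [minimum_points_loop, dif_pos hlt, hget]
      simp only [Option.getD_some]
      by_cases hc : v - start < threshold
      · rw [if_pos hc]
        have hrec := ih (points.length - (i + 2).toNat) (by omega) (i + 2) (q + 1) (by omega) rfl
        rw [hrec, hvr, pvCnt, if_pos hc]
        have hdrop : points.drop (i + 2).toNat = rest.drop 1 := by
          have : (i + 2).toNat = i.toNat + 2 := by omega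
          rw [this, ← List.drop_drop, hvr]
          simp
        rw [hdrop]; ring
      · rw [if_neg hc, hvr, pvCnt, if_neg hc]; ring
    · rw [minimum_points_loop, dif_neg hlt]
      have : points.drop i.toNat = [] := List.drop_eq_nil_iff.mpr (by omega)
      rw [this]
      simp [pvCnt]

theorem cnt_eq_cw_stride2 (threshold start : Int) (l : List Int) :
    pvCnt threshold start l = pvCW threshold start (pvStride2 l) := by
  induction l using pvCnt.induct threshold start with
  | case1 => simp [pvCnt, pvStride2, pvCW]
  | case2 v rest h ih => rw [pvCnt, if_pos h, pvStride2, pvCW, if_pos h, ih]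
  | case3 v rest h => rw [pvCnt, if_neg h, pvStride2, pvCW, if_neg h]

theorem cw_nonneg (threshold start : Int) (l : List Int) : 0 ≤ pvCW threshold start l := by
  induction l with
  | nil => simp [pvCW]
  | cons v rest ih => rw [pvCW]; split_ifs <;> omega

theorem cw_le_length (threshold start : Int) (l : List Int) :
    pvCW threshold start l ≤ l.length := by
  induction l with
  | nil => simp [pvCW]
  | cons v rest ih => rw [pvCW]; split_ifs <;> simp <;> omega

theorem cw_lt (threshold start : Int) (l : List Int) :
    ∀ j : Nat, (j : Int) < pvCW threshold start l → l.getD j 0 - start < threshold := by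
  induction l with
  | nil => intro j h; simp [pvCW] at h; omega
  | cons v rest ih =>
    intro j h
    rw [pvCW] at h
    by_cases hc : v - start < threshold
    · rw [if_pos hc] at h
      cases j with
      | zero => simpa using hc
      | succ k => simpa using ih k (by push_cast at h ⊢; omega)
    · rw [if_neg hc] at h; omega
  
theorem cw_at (threshold start : Int) (l : List Int)
    (h : pvCW threshold start l < l.length) :
    threshold ≤ l.getD (pvCW threshold start l).toNat 0 - start := by
  induction l with
  | nil => simp [pvCW] at h
  | cons v rest ih =>
    rw [pvCW] at h ⊢
    by_cases hc : v - start < threshold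
    · rw [if_pos hc] at h ⊢
      have h0 := cw_nonneg threshold start rest
      have ht : (1 + pvCW threshold start rest).toNat = (pvCW threshold start rest).toNat + 1 := by omega
      rw [ht]
      simp only [List.getD_cons_succ]
      exact ih (by simp at h; omega)
    · rw [if_neg hc] at h ⊢
      simpa using not_lt.mp hc

theorem pm_length (m : Int) (l : List Int) : (pvBuildPM m l).length = l.length := by
  induction l generalizing m with
  | nil => simp [pvBuildPM]
  | cons v rest ih => simp [pvBuildPM, ih]

theorem pm_lb (m : Int) (l : List Int) :
    ∀ k : Nat, k < l.length → m ≤ (pvBuildPM m l).getD k 0 := by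
  induction l generalizing m with
  | nil => intro k h; simp at h
  | cons v rest ih =>
    intro k h
    rw [pvBuildPM]
    cases k with
    | zero => simp only [List.getD_cons_zero]; split_ifs <;> omega
    | succ j =>
      simp only [List.getD_cons_succ]
      have := ih (if m < v then v else m) j (by simpa using h)
      split_ifs at this ⊢ <;> omega

theorem pm_mono (m : Int) (l : List Int) :
    ∀ i j : Nat, i ≤ j → j < l.length →
      (pvBuildPM m l).getD i 0 ≤ (pvBuildPM m l).getD j 0 := by
  induction l generalizing m with
  | nil => intro i j _ h; simp at h
  | cons v rest ih =>
    intro i j hij hj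
    rw [pvBuildPM]
    cases i with
    | zero =>
      cases j with
      | zero => simp
      | succ k =>
        simp only [List.getD_cons_zero, List.getD_cons_succ]
        exact pm_lb _ rest k (by simpa using hj)
    | succ i' =>
      cases j with
      | zero => omega
      | succ k =>
        simp only [List.getD_cons_succ]
        exact ih _ i' k (by omega) (by simpa using hj)

theorem pm_cw (threshold start : Int) (l : List Int) :
    ∀ m : Int, m - start < threshold →
      pvCW threshold start (pvBuildPM m l) = pvCW threshold start l := by
  induction l with
  | nil => intro m _; simp [pvBuildPM]
  | cons v rest ih =>
    intro m hm
    rw [pvBuildPM, pvCW, pvCW]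
    by_cases hc : v - start < threshold
    · have hm' : (if m < v then v else m) - start < threshold := by split_ifs <;> omega
      rw [if_pos hm', if_pos hc, ih _ hm']
    · have hm' : ¬ ((if m < v then v else m) - start < threshold) := by split_ifs <;> omega
      rw [if_neg hm', if_neg hc]

theorem bsearch_eq (threshold start : Int) (pm : List Int)
    (hmono : ∀ i j : Nat, i ≤ j → j < pm.length → pm.getD i 0 ≤ pm.getD j 0) :
    ∀ lo hi : Int, 0 ≤ lo → lo ≤ pvCW threshold start pm →
      pvCW threshold start pm ≤ hi → hi ≤ pm.length →
      pvBSearch threshold start pm lo hi = pvCW threshold start pm := by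
  intro lo hi
  induction h : (hi - lo).toNat using Nat.strong_induction_on generalizing lo hi with
  | _ fuel ih =>
    intro hlo hloF hFhi hhilen
    set F := pvCW threshold start pm with hF
    by_cases hlt : lo < hi
    · rw [pvBSearch, if_pos hlt]
      simp only []
      set mid := PySem.Int.floordiv (lo + hi) 2 with hmid
      have hmid2 : mid = (lo + hi) / 2 := by rw [hmid, pvFd]
      have hmlo : lo ≤ mid := by omega
      have hmhi : mid < hi := by omega
      have hmrange : mid.toNat < pm.length := by omega
      have hget : (PySem.List.pyGet? pm mid).getD 0 = pm.getD mid.toNat 0 := by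
        have hcast : ((mid.toNat : Nat) : Int) = mid := by omega
        rw [← hcast, PySem.List.pyGet?_natCast]
        simp [List.getD_eq_getElem?_getD]
        have hmax : max mid 0 = mid := by omega
        rw [hmax]
      rw [hget]
      by_cases hq : threshold ≤ pm.getD mid.toNat 0 - start
      · rw [if_pos hq]
        -- F ≤ mid : otherwise mid < F and cw_lt contradicts hq
        have hFmid : F ≤ mid := by
          by_contra hcon
          have := cw_lt threshold start pm mid.toNat (by omega)
          omega
        exact ih (hi := mid) (lo := lo) ((mid - lo).toNat) (by omega) rfl hlo hloF hFmid (by omega)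
      · rw [if_neg hq]
        -- mid < F : otherwise F ≤ mid, pm[F] ≥ thr and monotone gives pm[mid] ≥ thr
        have hmidF : mid + 1 ≤ F := by
          by_contra hcon
          have hFlen : F < pm.length := by omega
          have hat := cw_at threshold start pm (by omega)
          rw [← hF] at hat
          have hm := hmono F.toNat mid.toNat (by omega) hmrange
          have h0F := cw_nonneg threshold start pm
          omega
        exact ih (hi := hi) (lo := mid + 1) ((hi - (mid + 1)).toNat) (by omega) rfl (by omega) hmidF hFhi hhilen
    · rw [pvBSearch, if_neg hlt]
      omega

theorem stride2_head (v : Int) (rest : List Int) :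
    pvStride2 (v :: rest) = v :: pvStride2 (rest.drop 1) := by
  rw [pvStride2]

-- ===== VERDICT (by name: the statement is the Claim_ definition above) =====
theorem minimum_points_spec : Claim_equal_minimum_points := by
  intro threshold points _
  unfold Spec_minimum_points minimum_points minimum_points_alt
  simp only []
  by_cases h0 : (points.length : Int) ≤ 0
  · rw [if_pos h0, if_pos h0]
  · rw [if_neg h0, if_neg h0]
    obtain ⟨v, rest, rfl⟩ : ∃ v rest, points = v :: rest := by
      cases points with
      | nil => simp at h0
      | cons a b => exact ⟨a, b, rfl⟩
    have hget0 : PySem.List.pyGet? (v :: rest) 0 = some v := by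
      simp
    rw [hget0]
    simp only [Option.getD_some]
    by_cases h1 : (PySem.List.pyGet? (v :: rest) (-1)).getD 0 - v < threshold
    · rw [if_pos h1, if_pos h1]
    · rw [if_neg h1, if_neg h1]
      have hA := loop_eq_cnt threshold v (v :: rest) 0 1 le_rfl
      simp only [Int.toNat_zero, List.drop_zero] at hA
      rw [hA, cnt_eq_cw_stride2]
      -- B side
      rw [stride2_head]
      set evens := v :: pvStride2 (rest.drop 1) with hevens
      have hgetE : PySem.List.pyGet? evens 0 = some v := by
        simp [hevens]
      rw [hgetE]
      simp only [Option.getD_some]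
      set pm := pvBuildPM v evens with hpm
      have hpmcw : pvCW threshold v pm = pvCW threshold v evens := by
        by_cases ht : 0 < threshold
        · exact pm_cw threshold v evens v (by omega)
        · -- threshold ≤ 0: both heads equal v, both counts are 0
          rw [hpm, hevens, pvBuildPM]
          simp only [lt_irrefl, if_false]
          rw [pvCW, pvCW, if_neg (by omega), if_neg (by omega)]
      have hmono : ∀ i j : Nat, i ≤ j → j < pm.length → pm.getD i 0 ≤ pm.getD j 0 := by
        rw [hpm]
        exact fun i j hij hj => pm_mono v evens i j hij (by rwa [pm_length] at hj)
      rw [bsearch_eq threshold v pm hmono 0 pm.length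
            le_rfl (cw_nonneg _ _ _)
            (le_trans (le_of_eq hpmcw) (by rw [hpm, pm_length]; exact cw_le_length _ _ _))
            le_rfl,
          hpmcw]
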